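-- pv_equiv track=rewrite | github.com/google-research/jax3d | jax3d/projects/nesf/utils/xmap.py | _str_to_dict_shape_spec
-- ===== SOURCE A (Python) =====
-- from typing import Any, Callable, Dict, Optional, Sequence, Tuple, TypeVar
--
-- def _str_to_dict_shape_spec(spec_str: str) -> Dict[int, str]:
--   """Converts the `str` .
--
--   Args:
--     spec_str: The human readable spec string
--
--   Returns:
--     spec_dict: The boilerplate Jax `xmap` format.
--   """
--   tokens = spec_str.split()
--   if tokens.count('...') > 1:
--     raise ValueError(f'Invalid format \'{spec_str}\': Only one `...` allowed.')
--
--   axis_id = -1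
--   spec_dict = {}
--   for token in tokens:
--     axis_id += 1
--     if token == '_':  # Unused single dimension
--       pass
--     elif token == '...':  # Dynamic dimension
--       # Inverse the axis_id to start be the end.
--       # '... c' -> -2 == 0 - 2
--       # 'b ... c' -> -2 == 1 - 3
--       axis_id = axis_id - len(tokens)
--     else:
--       spec_dict[axis_id] = token
--   return spec_dict
-- ===== SOURCE B (Python) =====
-- def _str_to_dict_shape_spec(spec_str: str) -> dict:
--   tokens = spec_str.split()
--   if tokens.count('...') > 1:
--     raise ValueError(f'Invalid format \'{spec_str}\': Only one `...` allowed.')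
--   if '...' in tokens:
--     e = tokens.index('...')
--     left, right = tokens[:e], tokens[e + 1:]
--   else:
--     left, right = tokens, []
--   spec_dict = {i: tok for i, tok in enumerate(left) if tok != '_'}
--   spec_dict.update({k - len(right): tok for k, tok in enumerate(right) if tok != '_'})
--   return spec_dict
-- ===== Notes on version B (the rewrite author's own statement) =====
-- stated objective: alternative
-- what changed: Replaces A's single pass with a mutable axis counter that gets reset at the ellipsis token by an index/split decomposition: locate the ellipsis, slice the tokens into left/right segments, and build the dict from two enumerations (positive ids for the left segment, k - len(right) for the right).
import Mathlib
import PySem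

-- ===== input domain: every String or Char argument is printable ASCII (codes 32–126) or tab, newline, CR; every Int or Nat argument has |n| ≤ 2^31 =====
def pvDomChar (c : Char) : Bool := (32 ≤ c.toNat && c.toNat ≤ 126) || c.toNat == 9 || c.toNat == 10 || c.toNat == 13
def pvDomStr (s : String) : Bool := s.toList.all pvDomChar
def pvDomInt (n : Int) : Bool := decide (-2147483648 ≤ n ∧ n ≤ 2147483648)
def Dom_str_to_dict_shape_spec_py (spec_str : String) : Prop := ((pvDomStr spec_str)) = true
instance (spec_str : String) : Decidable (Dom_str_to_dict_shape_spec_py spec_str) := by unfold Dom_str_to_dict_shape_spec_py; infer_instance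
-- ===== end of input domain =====

-- B replaces A's mutable axis-counter loop by an index/split decomposition: find the ellipsis, slice the
-- token list into left/right, and build the dict from two enumerations (positive / negative ids).
-- Objective: alternative (same cost, different decomposition).


-- ===== PORT A =====
-- one loop step of A: axis_id += 1; skip underscore tokens; reset the counter at the ellipsis token; else insert
def aStep (n : Int) (st : Int × PySem.Dict Int String) (token : String) : Int × PySem.Dict Int String :=
  let axisId := st.1 + 1
  if token == "_" then (axisId, st.2)
  else if token == "..." then (axisId - n, st.2)
  else (axisId, st.2.insert axisId token)

def str_to_dict_shape_spec_py (spec_str : String) : List (Int × String) :=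
  let tokens := PySem.Str.split₀ spec_str
  let n : Int := PySem.List.len tokens
  ((tokens.foldl (aStep n) ((-1 : Int), PySem.Dict.empty)).2).items

-- ===== PORT B =====
def str_to_dict_shape_spec_py_alt (spec_str : String) : List (Int × String) :=
  let tokens := PySem.Str.split₀ spec_str
  let (left, right) :=
    match PySem.List.index? tokens "..." with
    | some e => (PySem.List.slice tokens none (some (e : Int)),
                 PySem.List.slice tokens (some ((e : Int) + 1)) none)
    | none => (tokens, ([] : List String))
  let m : Int := PySem.List.len right
  (PySem.List.enumerate left 0).filter (fun p => !(p.2 == "_"))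
    ++ ((PySem.List.enumerate right 0).filter (fun p => !(p.2 == "_"))).map
         (fun p => (p.1 - m, p.2))

-- ===== PRECONDITION & SPEC =====
-- Pre_ excludes exactly the inputs whose token list contains the ellipsis token more than once, where A raises ValueError.
def Pre_str_to_dict_shape_spec_py (spec_str : String) : Prop :=
  (PySem.Str.split₀ spec_str).count "..." ≤ 1
instance (spec_str : String) : Decidable (Pre_str_to_dict_shape_spec_py spec_str) := by unfold Pre_str_to_dict_shape_spec_py; infer_instance
def pvWitness_str_to_dict_shape_spec_py : String := "b ... c"

def Spec_str_to_dict_shape_spec_py (spec_str : String) (out : List (Int × String)) : Prop := out = str_to_dict_shape_spec_py_alt spec_str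
instance (spec_str : String) (out : List (Int × String)) : Decidable (Spec_str_to_dict_shape_spec_py spec_str out) := by unfold Spec_str_to_dict_shape_spec_py; infer_instance

-- ===== CLAIM (what is proved, stated in full; the proofs are below) =====
def Claim_equal_str_to_dict_shape_spec_py : Prop := ∀ (spec_str : String), Dom_str_to_dict_shape_spec_py spec_str → Pre_str_to_dict_shape_spec_py spec_str → Spec_str_to_dict_shape_spec_py spec_str (str_to_dict_shape_spec_py spec_str)

-- ===== LEMMAS AND PROOFS =====

-- shifting the start of an enumeration shifts every index
theorem enum_shift (xs : List String) (s : Int) :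
    PySem.List.enumerate xs s = (PySem.List.enumerate xs 0).map (fun p => (p.1 + s, p.2)) := by
  induction xs generalizing s with
  | nil => simp [PySem.List.enumerate_nil]
  | cons x xs ih =>
      rw [PySem.List.enumerate_cons, ih (s + 1),
          show PySem.List.enumerate (x :: xs) 0 = (0, x) :: PySem.List.enumerate xs 1 from by
            rw [PySem.List.enumerate_cons]; norm_num,
          ih 1]
      simp only [List.map_map, List.map_cons]
      congr 1
      · simp
      · apply List.map_congr_left; intro p _; simp; omega

-- A's loop over an ellipsis-free segment: counter advances by the length, inserts append
theorem seg (n : Int) (l : List String) (a : Int) (d : PySem.Dict Int String)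
    (hne : "..." ∉ l)
    (hfresh : ∀ k : Nat, k < l.length → d.contains (a + 1 + k) = false) :
    (l.foldl (aStep n) (a, d)).1 = a + l.length ∧
    (l.foldl (aStep n) (a, d)).2.items =
      d.items ++ (PySem.List.enumerate l (a + 1)).filter (fun p => !(p.2 == "_")) := by
  induction l generalizing a d with
  | nil => simp [PySem.List.enumerate_nil]
  | cons t l ih =>
      have hne' : "..." ∉ l := fun h => hne (List.mem_cons_of_mem _ h)
      have ht : t ≠ "..." := fun h => hne (h ▸ List.mem_cons_self ..)
      by_cases h_ : t = "_"
      · subst h_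
        have hstep : aStep n (a, d) "_" = (a + 1, d) := by simp [aStep]
        have hf' : ∀ k : Nat, k < l.length → d.contains ((a + 1) + 1 + k) = false := by
          intro k hk
          have h2 := hfresh (k + 1) (by simpa using Nat.succ_lt_succ hk)
          have harg : (a + 1) + 1 + (k : Int) = a + 1 + ((k + 1 : Nat) : Int) := by push_cast; ring
          rw [harg]; exact h2
        obtain ⟨h1, h2⟩ := ih (a + 1) d hne' hf'
        refine ⟨?_, ?_⟩
        · simp only [List.foldl_cons, hstep]
          rw [h1]; simp only [List.length_cons]; push_cast; omega
        · simp only [List.foldl_cons, hstep]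
          rw [h2, PySem.List.enumerate_cons]
          simp
      · have hstep : aStep n (a, d) t = (a + 1, d.insert (a + 1) t) := by
          simp [aStep, h_, ht]
        have hc0 : d.contains (a + 1) = false := by
          have := hfresh 0 (by simp)
          simpa using this
        have hf' : ∀ k : Nat, k < l.length →
            (d.insert (a + 1) t).contains ((a + 1) + 1 + k) = false := by
          intro k hk
          rw [PySem.Dict.contains_insert]
          have h2 := hfresh (k + 1) (by simpa using Nat.succ_lt_succ hk)
          have hne2 : ((a + 1) + 1 + (k : Int) == a + 1) = false := by
            simp; omega
          rw [hne2]
          have harg : (a + 1) + 1 + (k : Int) = a + 1 + ((k + 1 : Nat) : Int) := by push_cast; ring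
          rw [harg]; exact h2
        obtain ⟨h1, h2⟩ := ih (a + 1) (d.insert (a + 1) t) hne' hf'
        refine ⟨?_, ?_⟩
        · simp only [List.foldl_cons, hstep] at *
          rw [h1]; simp only [List.length_cons]; push_cast; omega
        · simp only [List.foldl_cons, hstep] at *
          rw [h2, PySem.Dict.items_insert_of_not_contains _ _ hc0,
              PySem.List.enumerate_cons]
          simp [h_, List.append_assoc]

theorem str_to_dict_shape_spec_py_spec_aux (spec_str : String)
    (hpre : Pre_str_to_dict_shape_spec_py spec_str) :
    str_to_dict_shape_spec_py spec_str = str_to_dict_shape_spec_py_alt spec_str := by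
  unfold str_to_dict_shape_spec_py str_to_dict_shape_spec_py_alt
  set tokens := PySem.Str.split₀ spec_str with htok
  set ntok := PySem.List.len tokens with hntok
  cases hi : PySem.List.index? tokens "..." with
  | none =>
      have hnm : "..." ∉ tokens := (PySem.List.index?_eq_none_iff _ _).1 hi
      have hf : ∀ k : Nat, k < tokens.length →
          (PySem.Dict.empty : PySem.Dict Int String).contains ((-1 : Int) + 1 + k) = false := by
        intro k _; simp
      obtain ⟨_, h2⟩ := seg ntok tokens (-1) PySem.Dict.empty hnm hf
      simp only [hi]
      rw [h2]
      norm_num [PySem.Dict.items, PySem.Dict.empty]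
  | some e =>
      obtain ⟨pre, suf, hsplit, hlen, hpre_nm⟩ := (PySem.List.index?_eq_some_iff _ _ _).1 hi
      have hsuf_nm : "..." ∉ suf := by
        unfold Pre_str_to_dict_shape_spec_py at hpre
        rw [← htok, hsplit] at hpre
        simp [List.count_append] at hpre
        intro h
        have := List.count_pos_iff.2 h
        omega
      -- B's slices
      have hleft : PySem.List.slice tokens none (some (e : Int)) = pre := by
        rw [PySem.List.slice_to_natCast, hsplit, ← hlen, List.take_left]
      have hright : PySem.List.slice tokens (some ((e : Int) + 1)) none = suf := by
        have h1 : ((e : Int) + 1) = ((e + 1 : Nat) : Int) := by push_cast; ring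
        rw [h1, PySem.List.slice_from_natCast, hsplit, ← hlen]
        rw [show pre ++ "..." :: suf = (pre ++ ["..."]) ++ suf by simp]
        rw [List.drop_left' (by simp)]
      -- A's fold over pre
      have hfe : ∀ k : Nat, k < pre.length →
          (PySem.Dict.empty : PySem.Dict Int String).contains ((-1 : Int) + 1 + k) = false := by
        intro k _; simp
      obtain ⟨ha1, ha2⟩ := seg ntok pre (-1) PySem.Dict.empty hpre_nm hfe
      set st1 := pre.foldl (aStep ntok) ((-1 : Int), PySem.Dict.empty) with hst1
      -- the ellipsis step
      have hdots : aStep ntok st1 "..." = (st1.1 + 1 - ntok, st1.2) := by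
        simp [aStep]
      -- keys accumulated so far are nonnegative
      have hkeys : ∀ p ∈ st1.2.items, 0 ≤ p.1 := by
        intro p hp
        rw [ha2] at hp
        simp [PySem.Dict.empty, List.mem_filter] at hp
        rw [PySem.List.mem_enumerate_iff] at hp
        obtain ⟨⟨k, hk, hpk⟩, _⟩ := hp
        rw [hpk]; simp
      have hn : ntok = (pre.length : Int) + 1 + suf.length := by
        rw [hntok, PySem.List.len_eq, hsplit]; simp; ring
      have ha2start : st1.1 + 1 - ntok = -1 - suf.length := by
        rw [ha1, hn]; ring
      -- fresh keys for the suffix fold: they are negative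
      have hfs : ∀ k : Nat, k < suf.length →
          st1.2.contains ((-1 - (suf.length : Int)) + 1 + k) = false := by
        intro k hk
        rw [PySem.Dict.contains_eq_decide_mem_keys]
        simp only [decide_eq_false_iff_not, PySem.Dict.keys]
        intro hmem
        obtain ⟨p, hp, hp1⟩ := List.mem_map.1 hmem
        have := hkeys p hp
        omega
      obtain ⟨_, hb2⟩ := seg ntok suf (-1 - suf.length) st1.2 hsuf_nm hfs
      -- assemble: reduce B's match, then A's fold over the prefix, the ellipsis step, and the suffix
      simp only [hi, hleft, hright]
      rw [show tokens.foldl (aStep ntok) ((-1 : Int), PySem.Dict.empty)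
            = suf.foldl (aStep ntok) (aStep ntok st1 "...") from by
            rw [hsplit] ; rw [List.foldl_append, List.foldl_cons, ← hst1]]
      rw [hdots, ha2start, hb2, ha2]
      rw [show ((-1 : Int) - (suf.length : Int)) + 1 = -(suf.length : Int) from by ring,
          enum_shift suf (-(suf.length : Int)), List.filter_map]
      norm_num [PySem.Dict.items, PySem.Dict.empty, PySem.List.len_eq]
      rw [show List.filter ((fun (p : Int × String) => !(p.2 == "_")) ∘ fun p => (p.1 + -(suf.length : Int), p.2)) (PySem.List.enumerate suf 0)
            = List.filter (fun (p : Int × String) => !(p.2 == "_")) (PySem.List.enumerate suf 0) from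
            List.filter_congr (fun p _ => by simp)]
      apply List.map_congr_left; intro p _; simp; omega

-- ===== VERDICT (by name: the statement is the Claim_ definition above) =====
theorem str_to_dict_shape_spec_py_spec : Claim_equal_str_to_dict_shape_spec_py := by
  intro spec_str _ hpre
  unfold Spec_str_to_dict_shape_spec_py
  exact str_to_dict_shape_spec_py_spec_aux spec_str hpre
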